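-- pv_equiv track=rewrite | github.com/LLNL/hdbind | hdpy/data_utils/feat.py | compute_char_to_idx
-- ===== SOURCE A (Python) =====
-- def compute_char_to_idx(smiles_list):
--     _char_to_idx = {}
--     _char_idx = 0
--
--     # can do this in parallel
--     for smiles in smiles_list:
--         for char in smiles:
--             if char in _char_to_idx.keys():
--                 continue
--             else:
--                 _char_to_idx[char] = _char_idx
--                 _char_idx += 1
--
--     _char_to_idx["<unk>"] = _char_idx
--     return _char_to_idx
-- ===== SOURCE B (Python) =====
-- def compute_char_to_idx(smiles_list):
--     s = "".join(smiles_list)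
--     order = sorted(set(s), key=s.find)  # rank distinct chars by first-occurrence position
--     mapping = {c: i for i, c in enumerate(order)}
--     mapping["<unk>"] = len(order)
--     return mapping
-- ===== Notes on version B (the rewrite author's own statement) =====
-- stated objective: alternative
-- what changed: Instead of A's single pass that grows a dict with an interleaved membership check and counter, B joins the strings, takes the distinct characters as a set and SORTS them by their first-occurrence position (s.find), so each char's index is its rank in that sort; no incremental counter or membership-test-and-assign loop exists in B.
import Mathlib
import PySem

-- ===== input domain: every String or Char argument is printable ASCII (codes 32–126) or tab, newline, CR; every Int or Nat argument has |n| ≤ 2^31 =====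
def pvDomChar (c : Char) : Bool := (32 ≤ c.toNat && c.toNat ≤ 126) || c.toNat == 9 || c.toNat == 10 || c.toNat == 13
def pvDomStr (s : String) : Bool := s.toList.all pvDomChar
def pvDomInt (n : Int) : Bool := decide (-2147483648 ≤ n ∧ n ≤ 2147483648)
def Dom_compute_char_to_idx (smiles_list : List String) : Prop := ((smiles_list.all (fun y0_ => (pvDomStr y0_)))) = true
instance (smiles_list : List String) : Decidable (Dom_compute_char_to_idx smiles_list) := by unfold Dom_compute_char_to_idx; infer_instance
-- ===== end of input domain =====

-- B replaces A's single pass (dict grown with an interleaved membership check and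
-- counter) by sorting the distinct characters by first-occurrence position: each
-- char's index is its rank in that sort (alternative decomposition; same result).

-- ===== PORT A =====
def pvStepA (st : PySem.Dict String Int × Int) (c : Char) : PySem.Dict String Int × Int :=
  if st.1.contains (String.ofList [c]) then st
  else (st.1.insert (String.ofList [c]) st.2, st.2 + 1)

def compute_char_to_idx (smiles_list : List String) : List (String × Int) :=
  let st := smiles_list.foldl (fun st smiles => smiles.toList.foldl pvStepA st)
      (PySem.Dict.empty, 0)
  ((st.1.insert "<unk>" st.2)).items

-- ===== PORT B =====
-- s = "".join(smiles_list) is iterated only as characters, so it is ported as the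
-- char list of the join; sorted(set(s), key=s.find) is exact here because the key
-- (first-occurrence position) is injective on the set's distinct characters.
def compute_char_to_idx_alt (smiles_list : List String) : List (String × Int) :=
  let s := smiles_list.flatMap String.toList
  let order := PySem.List.sorted (PySem.Set.ofList s) (fun c => PySem.Chars.find s [c])
  let mapping := (PySem.List.enumerate order).map (fun p => (String.ofList [p.2], p.1))
  mapping ++ [("<unk>", (order.length : Int))]

-- ===== PRECONDITION & SPEC =====
def Spec_compute_char_to_idx (smiles_list : List String) (out : List (String × Int)) : Prop := out = compute_char_to_idx_alt smiles_list
instance (smiles_list : List String) (out : List (String × Int)) : Decidable (Spec_compute_char_to_idx smiles_list out) := by unfold Spec_compute_char_to_idx; infer_instance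

-- ===== CLAIM (what is proved, stated in full; the proofs are below) =====
def Claim_equal_compute_char_to_idx : Prop := ∀ (smiles_list : List String), Dom_compute_char_to_idx smiles_list → Spec_compute_char_to_idx smiles_list (compute_char_to_idx smiles_list)

-- ===== LEMMAS AND PROOFS =====

-- The dict-and-counter state of A's loop, as a function of the unique chars seen so far.
def pvState (u : List Char) : PySem.Dict String Int × Int :=
  (PySem.Dict.mk ((PySem.List.enumerate u).map (fun p => (String.ofList [p.2], p.1))),
   (u.length : Int))

lemma pvAny_map_key (l : List (Int × Char)) (c : Char) :
    (l.map (fun p => (String.ofList [p.2], p.1))).any (fun p => p.1 == String.ofList [c])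
      = (l.map (fun p => p.2)).contains c := by
  induction l with
  | nil => rfl
  | cons x xs ih =>
    simp only [List.map_cons, List.any_cons, List.contains_cons, ih]
    congr 1
    simp [beq_eq_decide, String.ofList_inj, eq_comm]

lemma pvContains_state (u : List Char) (c : Char) :
    (pvState u).1.contains (String.ofList [c]) = u.contains c := by
  show ((PySem.List.enumerate u).map (fun p => (String.ofList [p.2], p.1))).any
      (fun p => p.1 == String.ofList [c]) = u.contains c
  rw [pvAny_map_key, PySem.List.map_snd_enumerate]

lemma pvStepA_state (u : List Char) (c : Char) :
    pvStepA (pvState u) c = pvState (PySem.Set.add u c) := by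
  by_cases h : c ∈ u
  · have hc : u.contains c = true := by simpa using h
    simp [pvStepA, PySem.Set.add, PySem.Set.contains, pvContains_state, h]
  · have hc : u.contains c = false := by simpa using h
    have hnc : (pvState u).1.contains (String.ofList [c]) = false := by
      rw [pvContains_state, hc]
    have hins := PySem.Dict.items_insert_of_not_contains (pvState u).1
      ((u.length : Nat) : Int) hnc
    simp only [pvStepA, hnc, Bool.false_eq_true, if_false, PySem.Set.add, PySem.Set.contains, hc]
    refine Prod.ext ?_ ?_
    · apply PySem.Dict.ext
      show ((pvState u).1.insert (String.ofList [c]) (pvState u).2).items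
          = (pvState (u ++ [c])).1.items
      rw [show (pvState u).2 = ((u.length : Nat) : Int) from rfl, hins]
      simp [pvState, PySem.List.enumerate_append, PySem.List.enumerate_cons,
            PySem.List.enumerate_nil]
    · show (pvState u).2 + 1 = (pvState (u ++ [c])).2
      simp [pvState]

lemma pvFoldA_state (cs : List Char) (u : List Char) :
    cs.foldl pvStepA (pvState u) = pvState (cs.foldl PySem.Set.add u) := by
  induction cs generalizing u with
  | nil => rfl
  | cons c cs ih => simp [List.foldl_cons, pvStepA_state, ih]

lemma pvUnk_not_contains (u : List Char) :
    (pvState u).1.contains "<unk>" = false := by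
  show ((PySem.List.enumerate u).map (fun p => (String.ofList [p.2], p.1))).any
      (fun p => p.1 == "<unk>") = false
  simp only [List.any_map, List.any_eq_false, Function.comp_def]
  intro p _
  rw [beq_iff_eq]
  intro h
  have h2 := congrArg String.toList h
  rw [String.toList_ofList,
      show ("<unk>" : String).toList = ['<', 'u', 'n', 'k', '>'] from rfl] at h2
  exact absurd h2 (by simp)

-- find s [c] is exactly the first-occurrence index of c in s (when c occurs).
lemma pvFindGo_single (s : List Char) (c : Char) (k : Nat) (h : c ∈ s) :
    PySem.Chars.find.go [c] s k = ((k + s.idxOf c : Nat) : Int) := by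
  induction s generalizing k with
  | nil => cases h
  | cons x t ih =>
    by_cases hx : x = c
    · subst hx
      simp [PySem.Chars.find.go, List.isPrefixOf, List.idxOf_cons_self]
    · have hmem : c ∈ t := by cases h with
        | head => exact absurd rfl hx
        | tail _ h' => exact h'
      have hpre : [c].isPrefixOf (x :: t) = false := by
        simp [List.isPrefixOf]
        exact fun h' => hx h'.symm
      rw [PySem.Chars.find.go, hpre]
      simp only [Bool.false_eq_true, if_false]
      rw [ih (k + 1) hmem, List.idxOf_cons_ne _ hx]
      push_cast; ring

lemma pvFind_single (s : List Char) (c : Char) (h : c ∈ s) :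
    PySem.Chars.find s [c] = (s.idxOf c : Int) := by
  show PySem.Chars.find.go [c] s 0 = _
  rw [pvFindGo_single s c 0 h]
  simp

-- Generalized accumulator law for the dedup fold.
lemma pvFoldAdd_acc (l acc : List Char) :
    l.foldl PySem.Set.add acc
      = acc ++ (l.foldl PySem.Set.add []).filter (fun x => !acc.contains x) := by
  induction l generalizing acc with
  | nil => simp
  | cons x l ih =>
    simp only [List.foldl_cons]
    rw [ih (PySem.Set.add acc x), ih (PySem.Set.add [] x)]
    by_cases hx : x ∈ acc
    · have : PySem.Set.add acc x = acc := by
        simp [PySem.Set.add, PySem.Set.contains, hx]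
      rw [this]
      have : PySem.Set.add ([] : List Char) x = [x] := rfl
      rw [this]
      congr 1
      rw [List.filter_append]
      have h1 : ([x].filter (fun y => !acc.contains y)) = [] := by
        simp [List.filter, hx]
      rw [h1, List.nil_append, List.filter_filter]
      apply List.filter_congr
      intro y _
      by_cases hy : y = x
      · subst hy; simp [hx]
      · simp [hy]
    · have h1 : PySem.Set.add acc x = acc ++ [x] := by
        simp [PySem.Set.add, PySem.Set.contains, hx]
      have h2 : PySem.Set.add ([] : List Char) x = [x] := rfl
      rw [h1, h2, List.filter_append, List.append_assoc]
      congr 1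
      have h3 : ([x].filter (fun y => !acc.contains y)) = [x] := by
        simp [List.filter, hx]
      rw [h3]
      congr 1
      rw [List.filter_filter]
      apply List.filter_congr
      intro y _
      by_cases hy : y = x
      · subst hy; simp [hx]
      · simp [hy]

lemma pvOfList_cons (c : Char) (l : List Char) :
    PySem.Set.ofList (c :: l)
      = c :: (PySem.Set.ofList l).filter (fun x => !(x == c)) := by
  show List.foldl PySem.Set.add (PySem.Set.add [] c) l = _
  have h2 : PySem.Set.add ([] : List Char) c = [c] := rfl
  rw [h2, pvFoldAdd_acc]
  show _ = c :: (List.foldl PySem.Set.add [] l).filter _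
  rw [List.singleton_append]
  congr 1
  apply List.filter_congr
  intro y _
  simp [beq_eq_decide]

-- Along the dedup list, first-occurrence indices strictly increase.
lemma pvPairwise_idxOf (l : List Char) :
    List.Pairwise (fun a b => l.idxOf a < l.idxOf b) (PySem.Set.ofList l) := by
  induction l with
  | nil => exact List.Pairwise.nil
  | cons c l ih =>
    rw [pvOfList_cons]
    constructor
    · intro b hb
      have hbne : b ≠ c := by
        rcases List.mem_filter.mp hb with ⟨_, h2⟩
        simpa using h2
      rw [List.idxOf_cons_self, List.idxOf_cons_ne _ (by simpa using Ne.symm hbne)]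
      omega
    · have hf := List.Pairwise.filter (fun x => !(x == c)) ih
      refine List.Pairwise.imp_of_mem ?_ hf
      intro a b ha hb hlt
      have hane : a ≠ c := by
        rcases List.mem_filter.mp ha with ⟨_, h2⟩; simpa using h2
      have hbne : b ≠ c := by
        rcases List.mem_filter.mp hb with ⟨_, h2⟩; simpa using h2
      rw [List.idxOf_cons_ne _ (by simpa using Ne.symm hane),
          List.idxOf_cons_ne _ (by simpa using Ne.symm hbne)]
      omega

lemma pvPairwise_find (s : List Char) :
    List.Pairwise (fun a b => PySem.Chars.find s [a] < PySem.Chars.find s [b])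
      (PySem.Set.ofList s) := by
  refine List.Pairwise.imp_of_mem ?_ (pvPairwise_idxOf s)
  intro a b ha hb hlt
  have hamem : a ∈ s := (PySem.Set.mem_ofList s a).mp ha
  have hbmem : b ∈ s := (PySem.Set.mem_ofList s b).mp hb
  rw [pvFind_single s a hamem, pvFind_single s b hbmem]
  exact_mod_cast hlt

lemma pvSorted_ofList (s : List Char) :
    PySem.List.sorted (PySem.Set.ofList s) (fun c => PySem.Chars.find s [c])
      = PySem.Set.ofList s :=
  PySem.List.sorted_eq_of_perm_of_pairwise_lt _ _ _ (List.Perm.refl _) (pvPairwise_find s)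

-- ===== VERDICT (by name: the statement is the Claim_ definition above) =====
theorem compute_char_to_idx_spec : Claim_equal_compute_char_to_idx := by
  intro smiles_list _
  unfold Spec_compute_char_to_idx compute_char_to_idx
  have h0 : (PySem.Dict.empty (κ := String) (ν := Int), (0 : Int)) = pvState [] := rfl
  rw [h0, show (fun st smiles => (String.toList smiles).foldl pvStepA st)
        = (fun st (smiles : String) => (smiles.toList).foldl pvStepA st) from rfl,
      ← List.foldl_flatMap, pvFoldA_state]
  set s := smiles_list.flatMap String.toList with hs
  set U := s.foldl PySem.Set.add [] with hU
  rw [PySem.Dict.items_insert_of_not_contains _ _ (pvUnk_not_contains U)]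
  have hB : compute_char_to_idx_alt smiles_list =
      (PySem.List.enumerate U).map (fun p => (String.ofList [p.2], p.1)) ++
        [("<unk>", ((U.length : Nat) : Int))] := by
    show ((PySem.List.enumerate (PySem.List.sorted (PySem.Set.ofList s)
        (fun c => PySem.Chars.find s [c]))).map (fun p => (String.ofList [p.2], p.1))) ++
      [("<unk>", ((PySem.List.sorted (PySem.Set.ofList s)
        (fun c => PySem.Chars.find s [c])).length : Int))] = _
    rw [pvSorted_ofList]
    rfl
  rw [hB]
  show (pvState U).1.items ++ [("<unk>", (pvState U).2)] =
      (PySem.List.enumerate U).map (fun p => (String.ofList [p.2], p.1)) ++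
        [("<unk>", ((U.length : Nat) : Int))]
  simp [pvState]
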